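-- pv_equiv track=rewrite | github.com/DataPopkhadze/GOA-Homeworks | day 098/homework/matrix.py | func
-- ===== SOURCE A (Python) =====
-- def func(matrix):
--     unique_elements = []
--
--     for i in range(len(matrix)):
--         for j in range(len(matrix[i])):
--             element = matrix[i][j]
--             count = 0
--
--             for k in range(len(matrix)):
--                 for l in range(len(matrix[k])):
--                     if matrix[k][l] == element:
--                         count += 1
--
--             if count == 1:
--                 unique_elements.append(element)
--
--     return unique_elements
-- ===== SOURCE B (Python) =====
-- def func(matrix):
--     counts = {}
--     for row in matrix:
--         for element in row:
--             counts[element] = counts.get(element, 0) + 1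
--     return [element for row in matrix for element in row if counts[element] == 1]
-- ===== Notes on version B (the rewrite author's own statement) =====
-- stated objective: faster
-- what changed: Replaced the per-cell full rescan of the whole matrix by one counting pass building a dict of occurrence counts followed by one filtering pass in row-major order.
import Mathlib
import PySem

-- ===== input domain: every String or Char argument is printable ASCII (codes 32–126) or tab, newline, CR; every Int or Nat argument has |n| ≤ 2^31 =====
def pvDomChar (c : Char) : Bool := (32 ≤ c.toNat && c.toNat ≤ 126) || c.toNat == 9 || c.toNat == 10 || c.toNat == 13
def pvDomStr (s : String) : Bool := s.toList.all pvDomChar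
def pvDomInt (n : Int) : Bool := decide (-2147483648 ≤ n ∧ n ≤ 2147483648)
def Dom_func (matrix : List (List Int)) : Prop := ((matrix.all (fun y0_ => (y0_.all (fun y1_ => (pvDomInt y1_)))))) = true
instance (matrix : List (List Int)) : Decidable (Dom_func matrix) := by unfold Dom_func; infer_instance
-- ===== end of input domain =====

-- B replaces A's per-cell rescan of the whole matrix by one dict-counting pass plus one filtering pass (faster).

-- ===== PORT A =====
-- the inner double loop computing 'count' for one element
def funcCount (matrix : List (List Int)) (element : Int) : Int :=
  (PySem.List.pyRange 0 matrix.length 1).foldl (fun count k =>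
    (PySem.List.pyRange 0 (PySem.List.pyGetD matrix k []).length 1).foldl (fun count l =>
      if PySem.List.pyGetD (PySem.List.pyGetD matrix k []) l 0 == element then count + 1 else count)
      count) 0

def func (matrix : List (List Int)) : List Int :=
  (PySem.List.pyRange 0 matrix.length 1).foldl (fun unique_elements i =>
    (PySem.List.pyRange 0 (PySem.List.pyGetD matrix i []).length 1).foldl (fun unique_elements j =>
      if funcCount matrix (PySem.List.pyGetD (PySem.List.pyGetD matrix i []) j 0) == 1
      then unique_elements ++ [PySem.List.pyGetD (PySem.List.pyGetD matrix i []) j 0]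
      else unique_elements)
      unique_elements) []

-- ===== PORT B =====
def func_alt (matrix : List (List Int)) : List Int :=
  let counts : PySem.Dict Int Int :=
    matrix.foldl (fun d row => row.foldl (fun d element => d.insert element (d.getD element 0 + 1)) d) PySem.Dict.empty
  matrix.flatMap (fun row => row.filter (fun element => counts.getD element 0 == 1))

-- ===== PRECONDITION & SPEC =====
def Spec_func (matrix : List (List Int)) (out : List Int) : Prop := out = func_alt matrix
instance (matrix : List (List Int)) (out : List Int) : Decidable (Spec_func matrix out) := by unfold Spec_func; infer_instance

-- ===== CLAIM (what is proved, stated in full; the proofs are below) =====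
def Claim_equal_func : Prop := ∀ (matrix : List (List Int)), Dom_func matrix → Spec_func matrix (func matrix)

-- ===== LEMMAS AND PROOFS =====

theorem innerCount (e : Int) (row : List Int) (init : Int) :
    (PySem.List.pyRange 0 (row.length : Int) 1).foldl
        (fun c l => if PySem.List.pyGetD row l 0 == e then c + 1 else c) init
      = init + (row.count e : Nat) := by
  rw [PySem.List.foldl_pyRange_zero_pyGetD' row 0 (fun c x => if x == e then c + 1 else c) init]
  induction row generalizing init with
  | nil => simp
  | cons x xs ih =>
      rw [List.foldl_cons]
      by_cases hx : x = e
      · rw [if_pos (by simp [hx]), ih, List.count_cons, if_pos (by simp [hx])]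
        push_cast; ring
      · rw [if_neg (by simp [hx]), ih, List.count_cons, if_neg (by simp [hx])]
        simp

theorem funcCount_eq (matrix : List (List Int)) (e : Int) :
    funcCount matrix e = ((matrix.flatten).count e : Nat) := by
  unfold funcCount
  rw [PySem.List.foldl_pyRange_zero_pyGetD' matrix []
    (fun count row => (PySem.List.pyRange 0 (row.length : Int) 1).foldl
      (fun c l => if PySem.List.pyGetD row l 0 == e then c + 1 else c) count) 0]
  have outer : ∀ (rs : List (List Int)) (init : Int),
      rs.foldl (fun count row => (PySem.List.pyRange 0 (row.length : Int) 1).foldl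
        (fun c l => if PySem.List.pyGetD row l 0 == e then c + 1 else c) count) init
      = init + ((rs.flatten).count e : Nat) := by
    intro rs
    induction rs with
    | nil => simp
    | cons r rs' ih =>
        intro init
        rw [List.foldl_cons, innerCount, ih]
        simp [List.count_append]
        ring
  rw [outer]
  simp

theorem counts_getD (matrix : List (List Int)) (v : Int) :
    (matrix.foldl (fun d row => row.foldl (fun d element => d.insert element (d.getD element 0 + 1)) d)
        (PySem.Dict.empty : PySem.Dict Int Int)).getD v 0
      = ((matrix.flatten).count v : Nat) := by
  have key : ∀ (rs : List (List Int)) (d : PySem.Dict Int Int),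
      (rs.foldl (fun d row => row.foldl (fun d element => d.insert element (d.getD element 0 + 1)) d) d).getD v 0
        = d.getD v 0 + ((rs.flatten).count v : Nat) := by
    intro rs
    induction rs with
    | nil => simp
    | cons r rs' ih =>
        intro d
        rw [List.foldl_cons, ih, PySem.Dict.getD_foldl_insert_add_one]
        simp [List.count_append]
        ring
  rw [key]
  simp [PySem.Dict.empty, PySem.Dict.getD, PySem.Dict.get?]

theorem func_eq_filter (matrix : List (List Int)) :
    func matrix = (matrix.flatten).filter (fun x => ((matrix.flatten).count x : Nat) == (1 : Int)) := by
  unfold func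
  rw [PySem.List.foldl_pyRange_zero_pyGetD' matrix []
    (fun acc row => (PySem.List.pyRange 0 (row.length : Int) 1).foldl
      (fun acc l => if funcCount matrix (PySem.List.pyGetD row l 0) == 1
        then acc ++ [PySem.List.pyGetD row l 0] else acc) acc) []]
  have hrow : ∀ (row : List Int) (acc : List Int),
      (PySem.List.pyRange 0 (row.length : Int) 1).foldl
          (fun acc l => if funcCount matrix (PySem.List.pyGetD row l 0) == 1
            then acc ++ [PySem.List.pyGetD row l 0] else acc) acc
        = acc ++ row.filter (fun x => ((matrix.flatten).count x : Nat) == (1 : Int)) := by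
    intro row acc
    rw [PySem.List.foldl_pyRange_zero_pyGetD' row 0
      (fun acc x => if funcCount matrix x == 1 then acc ++ [x] else acc) acc]
    have hp : ∀ x : Int, (funcCount matrix x == 1) = (((matrix.flatten).count x : Nat) == (1 : Int)) := by
      intro x; rw [funcCount_eq]
    simp only [hp]
    exact PySem.List.foldl_append_if_eq_filter _ _ _
  have main : ∀ (rs : List (List Int)) (acc : List Int),
      rs.foldl (fun acc row => acc ++ row.filter (fun x => ((matrix.flatten).count x : Nat) == (1 : Int))) acc
        = acc ++ (rs.flatten).filter (fun x => ((matrix.flatten).count x : Nat) == (1 : Int)) := by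
    intro rs
    induction rs with
    | nil => simp
    | cons r rs' ih => intro acc; simp [List.filter_append, ih]
  calc matrix.foldl (fun acc row => (PySem.List.pyRange 0 (row.length : Int) 1).foldl
          (fun acc l => if funcCount matrix (PySem.List.pyGetD row l 0) == 1
            then acc ++ [PySem.List.pyGetD row l 0] else acc) acc) []
      = matrix.foldl (fun acc row => acc ++ row.filter
          (fun x => ((matrix.flatten).count x : Nat) == (1 : Int))) [] := by
        apply PySem.List.foldl_congr_mem; intro acc row _; exact hrow row acc
    _ = _ := by rw [main]; simp

theorem func_alt_eq_filter (matrix : List (List Int)) :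
    func_alt matrix = (matrix.flatten).filter (fun x => ((matrix.flatten).count x : Nat) == (1 : Int)) := by
  have fm : ∀ (p : Int → Bool) (rs : List (List Int)),
      rs.flatMap (fun row => row.filter p) = (rs.flatten).filter p := by
    intro p rs
    induction rs with
    | nil => simp
    | cons r rs' ih => simp [List.filter_append, ih]
  unfold func_alt
  simp only [counts_getD]
  exact fm _ _

-- ===== VERDICT (by name: the statement is the Claim_ definition above) =====
theorem func_spec : Claim_equal_func := by
  intro matrix _
  unfold Spec_func
  rw [func_eq_filter, func_alt_eq_filter]
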